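-- pv_equiv track=rewrite | github.com/colinschepers/AdventOfCode | challenges/2022/day06.py | get_marker_idx
-- ===== SOURCE A (Python) =====
-- from collections import defaultdict
--
-- def get_marker_idx(signal: str, length: int) -> int:
--     buff = defaultdict(int)
--     for i, c in enumerate(signal):
--         buff[c] += 1
--         if i >= length:
--             buff[signal[i - length]] -= 1
--             if buff[signal[i - length]] == 0:
--                 del buff[signal[i - length]]
--         if len(buff) == length:
--             return i
-- ===== SOURCE B (Python) =====
-- def get_marker_idx(sig: str, length: int) -> int:
--     # Simpler: test each candidate end index directly by slicing the window
--     # and counting its distinct characters, instead of maintaining an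
--     # incremental counter dict.
--     for i in range(max(length - 1, 0), len(sig)):
--         if len(set(sig[i - length + 1:i + 1])) == length:
--             return i
-- ===== Notes on version B (the rewrite author's own statement) =====
-- stated objective: simpler
-- what changed: Replaces the incremental sliding defaultdict counter (add new char, decrement/delete outgoing char, compare dict size) by a direct scan over candidate end indices that slices each window and counts its distinct characters with set(); no state is carried between iterations.
import Mathlib
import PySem

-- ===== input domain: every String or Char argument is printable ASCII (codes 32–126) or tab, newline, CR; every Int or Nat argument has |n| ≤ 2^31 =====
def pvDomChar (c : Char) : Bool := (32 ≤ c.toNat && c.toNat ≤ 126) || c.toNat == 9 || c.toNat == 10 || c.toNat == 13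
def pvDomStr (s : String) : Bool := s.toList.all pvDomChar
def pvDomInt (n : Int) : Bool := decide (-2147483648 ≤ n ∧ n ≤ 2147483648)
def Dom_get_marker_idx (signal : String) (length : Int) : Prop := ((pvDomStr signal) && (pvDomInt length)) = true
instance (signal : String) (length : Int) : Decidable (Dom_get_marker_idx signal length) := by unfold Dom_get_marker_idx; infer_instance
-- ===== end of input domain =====

-- B replaces A's incremental sliding counter dict by a per-candidate window slice whose
-- distinct characters are counted with set(); objective: simpler (not faster).


-- ===== PORT A =====
-- loop 'for i, c in enumerate(signal)': defaultdict(int) buff; buff[c] += 1;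
-- if i >= length: decrement buff[signal[i-length]] and delete it when it hits 0;
-- return i when len(buff) == length.  (signal[i - length] is in range on every
-- input Pre_ admits; pyGetD's default is never used there.)
def pvLoopA (sig : List Char) (length : Int) : List Char → Nat → PySem.Dict Char Int → Option Int
  | [], _, _ => none
  | c :: rest, i, buff =>
    let b1 := buff.insert c (buff.getD c 0 + 1)
    let b2 := if length ≤ (i : Int) then
        let d := PySem.List.pyGetD sig ((i : Int) - length) c
        let b := b1.insert d (b1.getD d 0 - 1)
        if b.getD d 0 = 0 then b.erase d else b
      else b1
    if (b2.size : Int) = length then some (i : Int) else pvLoopA sig length rest (i + 1) b2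

def get_marker_idx (signal : String) (length : Int) : Option Int :=
  pvLoopA signal.toList length signal.toList 0 PySem.Dict.empty

-- ===== PORT B =====
-- 'for i in range(max(length-1,0), len(signal)): if len(set(signal[i-length+1:i+1])) == length: return i'
def pvLoopB (sig : List Char) (length : Int) : List Int → Option Int
  | [] => none
  | i :: rest =>
    if PySem.Set.len (PySem.Set.ofList (PySem.List.slice sig (some (i - length + 1)) (some (i + 1)))) = length
    then some i else pvLoopB sig length rest

def get_marker_idx_alt (signal : String) (length : Int) : Option Int :=
  pvLoopB signal.toList length (PySem.List.pyRange (max (length - 1) 0) (PySem.List.len signal.toList) 1)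

-- ===== PRECONDITION & SPEC =====
-- A raises IndexError whenever length < 0 and the signal is non-empty (signal[i - length]
-- indexes past the end); those inputs are excluded.  A is total everywhere else.
def Pre_get_marker_idx (signal : String) (length : Int) : Prop := 0 ≤ length ∨ signal.toList = []
instance (signal : String) (length : Int) : Decidable (Pre_get_marker_idx signal length) := by unfold Pre_get_marker_idx; infer_instance
def pvWitness_get_marker_idx : String × Int := ("mjqjpqmgbljsphdztnvjfqwrcgsmlb", 4)

def Spec_get_marker_idx (signal : String) (length : Int) (out : Option Int) : Prop := out = get_marker_idx_alt signal length
instance (signal : String) (length : Int) (out : Option Int) : Decidable (Spec_get_marker_idx signal length out) := by unfold Spec_get_marker_idx; infer_instance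

-- ===== CLAIM (what is proved, stated in full; the proofs are below) =====
def Claim_equal_get_marker_idx : Prop := ∀ (signal : String) (length : Int), Dom_get_marker_idx signal length → Pre_get_marker_idx signal length → Spec_get_marker_idx signal length (get_marker_idx signal length)

-- ===== LEMMAS AND PROOFS =====

-- small facts about Dict.erase (not in the PySem lemma book)
theorem pvFind?_filter_self {ν : Type} (l : List (Char × ν)) (k : Char) :
    (l.filter (fun p => !(p.1 == k))).find? (fun p => p.1 == k) = none := by
  induction l with
  | nil => rfl
  | cons p rest ih =>
    by_cases h : p.1 = k <;> simp [h, ih]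

theorem pvFind?_filter_of_ne {ν : Type} (l : List (Char × ν)) (k c : Char) (h : c ≠ k) :
    (l.filter (fun p => !(p.1 == k))).find? (fun p => p.1 == c) = l.find? (fun p => p.1 == c) := by
  induction l with
  | nil => rfl
  | cons p rest ih =>
    by_cases hk : p.1 = k
    · have hkc : (k == c) = false := by simp; exact fun e => h e.symm
      simp [List.filter_cons, hk, hkc, ih]
    · by_cases hc : p.1 = c <;> simp [List.filter_cons, hk, hc, ih, h]

theorem pvKeys_erase {ν : Type} (d : PySem.Dict Char ν) (k : Char) :
    (d.erase k).keys = d.keys.filter (fun x => !(x == k)) := by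
  simp only [PySem.Dict.erase, PySem.Dict.keys]
  exact (List.filter_map (f := fun x : Char × ν => x.1) (p := fun x => !x == k) (l := d.items)).symm

theorem pvGet?_erase_self {ν : Type} (d : PySem.Dict Char ν) (k : Char) :
    (d.erase k).get? k = none := by
  simp only [PySem.Dict.erase, PySem.Dict.get?, pvFind?_filter_self, Option.map_none]

theorem pvGet?_erase_of_ne {ν : Type} (d : PySem.Dict Char ν) (k c : Char) (h : c ≠ k) :
    (d.erase k).get? c = d.get? c := by
  simp only [PySem.Dict.erase, PySem.Dict.get?, pvFind?_filter_of_ne d.items k c h]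

-- the loop invariant: buff is exactly the multiset of the current window
def pvInv (d : PySem.Dict Char Int) (w : List Char) : Prop :=
  (∀ c, d.getD c 0 = (w.count c : Int)) ∧ d.keys.Nodup ∧ (∀ c, c ∈ d.keys ↔ c ∈ w)

theorem pvInv_empty : pvInv PySem.Dict.empty [] := by
  refine ⟨fun c => by simp [PySem.Dict.getD_empty], by simp [PySem.Dict.keys_empty], fun c => by simp [PySem.Dict.keys_empty]⟩

theorem pvInv_add (d : PySem.Dict Char Int) (w : List Char) (c : Char) (h : pvInv d w) :
    pvInv (d.insert c (d.getD c 0 + 1)) (w ++ [c]) := by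
  obtain ⟨hcnt, hnd, hmem⟩ := h
  refine ⟨fun x => ?_, PySem.Dict.nodup_keys_insert _ _ _ hnd, fun x => ?_⟩
  · rw [PySem.Dict.getD_insert]
    by_cases hx : x = c
    · subst hx; simp [hcnt, List.count_append]
    · simp [hx, hcnt, List.count_append, Ne.symm hx]
  · rw [PySem.Dict.mem_keys_insert]
    by_cases hx : x = c <;> simp [hx, hmem]

theorem pvInv_remove (d : PySem.Dict Char Int) (w : List Char) (k : Char) (h : pvInv d (k :: w)) :
    pvInv (if (d.insert k (d.getD k 0 - 1)).getD k 0 = 0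
           then (d.insert k (d.getD k 0 - 1)).erase k
           else d.insert k (d.getD k 0 - 1)) w := by
  obtain ⟨hcnt, hnd, hmem⟩ := h
  have hk : d.getD k 0 = (w.count k : Int) + 1 := by
    have := hcnt k; simpa [List.count_cons] using this
  have hgetk : (d.insert k (d.getD k 0 - 1)).getD k 0 = (w.count k : Int) := by
    rw [PySem.Dict.getD_insert]; simp [hk]
  have hgetne : ∀ x, x ≠ k → (d.insert k (d.getD k 0 - 1)).getD x 0 = (w.count x : Int) := by
    intro x hx
    rw [PySem.Dict.getD_insert, if_neg hx]
    have h1 := hcnt x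
    rw [List.count_cons] at h1
    simpa [hx, Ne.symm hx] using h1
  by_cases hz : (d.insert k (d.getD k 0 - 1)).getD k 0 = 0
  · have hk0 : w.count k = 0 := by
      have := hgetk; rw [hz] at this; exact_mod_cast this.symm
    have hknot : k ∉ w := by simpa using List.count_eq_zero.mp hk0
    simp only [if_pos hz]
    refine ⟨fun x => ?_, ?_, fun x => ?_⟩
    · by_cases hx : x = k
      · subst hx
        simp [PySem.Dict.getD, pvGet?_erase_self, hk0]
      · simp [PySem.Dict.getD, pvGet?_erase_of_ne _ _ _ hx]
        have := hgetne x hx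
        simpa [PySem.Dict.getD] using this
    · rw [pvKeys_erase]
      exact (PySem.Dict.nodup_keys_insert _ _ _ hnd).filter _
    · rw [pvKeys_erase, List.mem_filter, PySem.Dict.mem_keys_insert]
      constructor
      · rintro ⟨hin, hne⟩
        have hne' : x ≠ k := by simpa using hne
        rcases hin with h1 | h1
        · exact absurd h1 hne'
        · have := (hmem x).mp h1
          simpa [hne'] using this
      · intro hxw
        have hne' : x ≠ k := fun hc => hknot (hc ▸ hxw)
        exact ⟨Or.inr ((hmem x).mpr (by simp [hxw])), by simpa using hne'⟩
  · simp only [if_neg hz]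
    have hkw : k ∈ w := by
      by_contra hkn
      have : w.count k = 0 := List.count_eq_zero.mpr hkn
      exact hz (by rw [hgetk, this]; simp)
    refine ⟨fun x => ?_, PySem.Dict.nodup_keys_insert _ _ _ hnd, fun x => ?_⟩
    · by_cases hx : x = k
      · subst hx; exact hgetk
      · exact hgetne x hx
    · rw [PySem.Dict.mem_keys_insert]
      by_cases hx : x = k
      · simp [hx, hkw]
      · have := hmem x
        simp [hx, List.mem_cons] at this ⊢
        exact this

-- dict size and the distinct count of the window coincide under the invariant
theorem pvSize_eq (d : PySem.Dict Char Int) (w : List Char) (h : pvInv d w) :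
    d.size = (PySem.Set.ofList w).length := by
  obtain ⟨-, hnd, hmem⟩ := h
  have hsize : d.size = d.keys.length := by
    simp [PySem.Dict.size, PySem.Dict.keys]
  have h1 : d.keys.toFinset = (PySem.Set.ofList w).toFinset := by
    ext x
    simp [hmem x, PySem.Set.mem_ofList]
  calc d.size = d.keys.toFinset.card := by rw [hsize, List.toFinset_card_of_nodup hnd]
    _ = (PySem.Set.ofList w).toFinset.card := by rw [h1]
    _ = (PySem.Set.ofList w).length := List.toFinset_card_of_nodup (PySem.Set.nodup_ofList w)

-- the main simulation: A's loop from index i equals B's loop over the remaining candidates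
theorem pvMain (sig : List Char) (L : Nat) (hL : 1 ≤ L) :
    ∀ rest i buff, sig.drop i = rest → i ≤ sig.length →
      pvInv buff ((sig.take i).drop (i - L)) →
      pvLoopA sig (L : Int) rest i buff =
        pvLoopB sig (L : Int) (PySem.List.pyRange (max (i : Int) ((L : Int) - 1)) (sig.length : Int) 1) := by
  intro rest
  induction rest with
  | nil =>
    intro i buff hdrop hle _
    have hin : sig.length ≤ i := List.drop_eq_nil_iff.mp hdrop
    have : (sig.length : Int) ≤ max (i : Int) ((L : Int) - 1) := by
      have := le_max_left (i : Int) ((L : Int) - 1)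
      omega
    rw [PySem.List.pyRange_one_eq_nil this]
    rfl
  | cons c rest' ih =>
    intro i buff hdrop hle hinv
    have hilt : i < sig.length := by
      by_contra hge
      push_neg at hge
      rw [List.drop_eq_nil_of_le hge] at hdrop
      exact absurd hdrop (by simp)
    have h2 : sig.drop i = sig[i] :: sig.drop (i + 1) := List.drop_eq_getElem_cons hilt
    rw [hdrop] at h2
    injection h2 with hg hr
    have hget : sig[i] = c := hg.symm
    have hdrop' : sig.drop (i + 1) = rest' := hr.symm
    have htake : sig.take (i + 1) = sig.take i ++ [c] := by
      rw [List.take_succ]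
      simp [List.getElem?_eq_getElem hilt, hget]
    -- the window after this iteration
    set W : List Char := (sig.take (i + 1)).drop (i + 1 - L) with hW
    -- compute b2 and its invariant
    have hstep : ∀ b2 : PySem.Dict Char Int,
        (b2 = if (L : Int) ≤ (i : Int) then
            (let d := PySem.List.pyGetD sig ((i : Int) - (L : Int)) c
             let b := (buff.insert c (buff.getD c 0 + 1)).insert d
                        ((buff.insert c (buff.getD c 0 + 1)).getD d 0 - 1)
             if b.getD d 0 = 0 then b.erase d else b)
          else buff.insert c (buff.getD c 0 + 1)) → pvInv b2 W := by
      intro b2 hb2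
      have hadd := pvInv_add buff _ c hinv
      by_cases hLi : (L : Int) ≤ (i : Int)
      · have hLi' : L ≤ i := by exact_mod_cast hLi
        have hiL : (i : Int) - (L : Int) = ((i - L : Nat) : Int) := by
          push_cast [Nat.cast_sub hLi']; ring
        have hlt2 : i - L < sig.length := by omega
        have hd : PySem.List.pyGetD sig ((i : Int) - (L : Int)) c = sig[i - L] := by
          rw [hiL, PySem.List.pyGetD_natCast]
          exact List.getD_eq_getElem _ _ hlt2
        -- (take i sig).drop (i-L) ++ [c] = sig[i-L] :: W
        have hwin : (sig.take i).drop (i - L) ++ [c] = sig[i - L] :: W := by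
          have e1 : (sig.take i).drop (i - L) ++ [c] = (sig.take (i + 1)).drop (i - L) := by
            rw [htake, List.drop_append_of_le_length]
            simp [List.length_take]
            omega
          have hlt3 : i - L < (sig.take (i + 1)).length := by
            simp [List.length_take]; omega
          have e2 : (sig.take (i + 1)).drop (i - L) = (sig.take (i + 1))[i - L] :: (sig.take (i + 1)).drop (i - L + 1) := List.drop_eq_getElem_cons hlt3
          have e3 : (sig.take (i + 1))[i - L] = sig[i - L] := List.getElem_take
          have e4 : i - L + 1 = i + 1 - L := by omega
          rw [e1, e2, e3, e4]
        rw [hb2]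
        simp only [if_pos hLi, hd]
        have hinv' : pvInv (buff.insert c (buff.getD c 0 + 1)) (sig[i - L] :: W) := by
          rw [← hwin]; exact hadd
        exact pvInv_remove _ _ _ hinv'
      · have hiL' : i < L := by omega
        have : W = (sig.take i).drop (i - L) ++ [c] := by
          rw [hW, htake]
          have e1 : i + 1 - L = 0 := by omega
          have e2 : i - L = 0 := by omega
          simp [e1, e2]
        rw [hb2]
        simp only [if_neg hLi]
        rw [this]
        exact hadd
    -- the test A performs equals the test B performs at candidate i
    have hslice : PySem.List.slice sig (some ((i : Int) - (L : Int) + 1)) (some ((i : Int) + 1)) = W ∨ L > i + 1 := by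
      by_cases hcand : L ≤ i + 1
      · left
        have e1 : (i : Int) - (L : Int) + 1 = ((i + 1 - L : Nat) : Int) := by
          push_cast [Nat.cast_sub hcand]; ring
        have e2 : (i : Int) + 1 = ((i + 1 : Nat) : Int) := by push_cast; ring
        rw [e1, e2, PySem.List.slice_natCast, hW, List.drop_take]
      · right; omega
    -- unfold one step of A
    rw [show pvLoopA sig (L : Int) (c :: rest') i buff =
        (let b1 := buff.insert c (buff.getD c 0 + 1)
         let b2 := if (L : Int) ≤ (i : Int) then
             let d := PySem.List.pyGetD sig ((i : Int) - (L : Int)) c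
             let b := b1.insert d (b1.getD d 0 - 1)
             if b.getD d 0 = 0 then b.erase d else b
           else b1
         if (b2.size : Int) = (L : Int) then some (i : Int)
         else pvLoopA sig (L : Int) rest' (i + 1) b2) from rfl]
    simp only []
    set b2 := if (L : Int) ≤ (i : Int) then
        let d := PySem.List.pyGetD sig ((i : Int) - (L : Int)) c
        let b := (buff.insert c (buff.getD c 0 + 1)).insert d
                   ((buff.insert c (buff.getD c 0 + 1)).getD d 0 - 1)
        if b.getD d 0 = 0 then b.erase d else b
      else buff.insert c (buff.getD c 0 + 1) with hb2def
    have hinvb2 : pvInv b2 W := hstep b2 hb2def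
    have hsz : b2.size = (PySem.Set.ofList W).length := pvSize_eq _ _ hinvb2
    by_cases hcand : L ≤ i + 1
    · -- candidate index: both loops test the same window
      have hmax : max (i : Int) ((L : Int) - 1) = (i : Int) := by omega
      have hwinB : PySem.List.slice sig (some ((i : Int) - (L : Int) + 1)) (some ((i : Int) + 1)) = W := by
        rcases hslice with h | h
        · exact h
        · omega
      rw [hmax, PySem.List.pyRange_one_cons (by exact_mod_cast hilt)]
      rw [show pvLoopB sig (L : Int) ((i : Int) :: PySem.List.pyRange ((i : Int) + 1) (sig.length : Int) 1) =
          (if PySem.Set.len (PySem.Set.ofList (PySem.List.slice sig (some ((i : Int) - (L : Int) + 1)) (some ((i : Int) + 1)))) = (L : Int)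
           then some (i : Int)
           else pvLoopB sig (L : Int) (PySem.List.pyRange ((i : Int) + 1) (sig.length : Int) 1)) from rfl]
      rw [hwinB]
      have htesteq : ((b2.size : Int) = (L : Int)) ↔ (PySem.Set.len (PySem.Set.ofList W) = (L : Int)) := by
        rw [hsz]; simp [PySem.Set.len]
      by_cases ht : (b2.size : Int) = (L : Int)
      · rw [if_pos ht, if_pos (htesteq.mp ht)]
      · rw [if_neg ht, if_neg (fun hc => ht (htesteq.mpr hc))]
        have hrec := ih (i + 1) b2 hdrop' (by omega) hinvb2
        rw [show ((i + 1 : Nat) : Int) = (i : Int) + 1 by omega] at hrec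
        rw [show max ((i : Int) + 1) ((L : Int) - 1) = (i : Int) + 1 by omega] at hrec
        exact hrec
    · -- not yet a candidate: A's test is false, B's range has not started
      have hnotest : ¬ ((b2.size : Int) = (L : Int)) := by
        intro hc
        have h1 : (PySem.Set.ofList W).length ≤ W.length := by
          calc (PySem.Set.ofList W).length = (PySem.Set.ofList W).toFinset.card :=
                (List.toFinset_card_of_nodup (PySem.Set.nodup_ofList W)).symm
            _ ≤ W.length := by
                have : (PySem.Set.ofList W).toFinset = W.toFinset := by
                  ext x; simp [PySem.Set.mem_ofList]
                rw [this]; exact List.toFinset_card_le W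
        have h2 : W.length ≤ i + 1 := by
          rw [hW]
          simp [List.length_take, List.length_drop]
        have : b2.size ≤ i + 1 := by rw [hsz]; omega
        omega
      rw [if_neg hnotest]
      have hmax2 : max ((i : Int) + 1) ((L : Int) - 1) = max (i : Int) ((L : Int) - 1) := by omega
      have hrec := ih (i + 1) b2 hdrop' (by omega) hinvb2
      rw [show ((i + 1 : Nat) : Int) = (i : Int) + 1 by omega] at hrec
      rw [hrec, hmax2]

-- ===== VERDICT (by name: the statement is the Claim_ definition above) =====
theorem get_marker_idx_spec : Claim_equal_get_marker_idx := by
  intro signal length _ hpre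
  unfold Spec_get_marker_idx get_marker_idx get_marker_idx_alt
  rcases hpre with hnn | hemp
  · obtain ⟨L, rfl⟩ : ∃ L : Nat, length = (L : Int) := ⟨length.toNat, (Int.toNat_of_nonneg hnn).symm⟩
    rcases Nat.eq_zero_or_pos L with hL0 | hL1
    · subst hL0
      cases hsig : signal.toList with
      | nil =>
        rw [PySem.List.pyRange_one_eq_nil (by simp [PySem.List.len])]
        rfl
      | cons c rest =>
        have hA : pvLoopA (c :: rest) ((0 : Nat) : Int) (c :: rest) 0 PySem.Dict.empty = some 0 := by
          simp [pvLoopA, PySem.Dict.insert, PySem.Dict.empty, PySem.Dict.contains,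
            PySem.Dict.getD, PySem.Dict.get?, PySem.Dict.erase, PySem.Dict.size,
            PySem.List.pyGetD]
        have hB : pvLoopB (c :: rest) ((0 : Nat) : Int)
            (PySem.List.pyRange (max (((0 : Nat) : Int) - 1) 0) (PySem.List.len (c :: rest)) 1) = some 0 := by
          rw [show max (((0 : Nat) : Int) - 1) 0 = 0 by simp]
          rw [PySem.List.pyRange_one_cons (by simp [PySem.List.len])]
          simp [pvLoopB, PySem.Set.len]
        rw [hA, hB]
    · have hm := pvMain signal.toList L hL1 signal.toList 0 PySem.Dict.empty rfl (Nat.zero_le _)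
        (by simpa using pvInv_empty)
      rw [hm]
      have : max ((0 : Nat) : Int) ((L : Int) - 1) = max ((L : Int) - 1) 0 := by
        simp [max_comm]
      rw [this]
      simp [PySem.List.len]
  · rw [hemp]
    rw [PySem.List.pyRange_one_eq_nil (by simp [PySem.List.len])]
    rfl
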